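-- pv_equiv track=rewrite | github.com/maneloy/hello-world | Exercises/AlgoyProg1/ej7_7.py | ordenar_nombres
-- ===== SOURCE A (Python) =====
-- def ordenar_nombres(lista):
-- 	lista_auxiliar = lista[:]
-- 	for i in range(len(lista_auxiliar)):
-- 		lista_auxiliar[i] = (lista_auxiliar[i][1], lista_auxiliar[i][2], lista_auxiliar[i][0])
-- 	for i in range(len(lista_auxiliar)):
-- 		lista_auxiliar[i] = " ".join(lista_auxiliar[i])
-- 	for i in range(len(lista_auxiliar)):
-- 		contador_espacios = 0
-- 		nueva_lista = ""
-- 		for char in lista_auxiliar[i]: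
-- 			if char == " " and contador_espacios == 1:
-- 				nueva_lista += ". "
-- 				contador_espacios += 1
-- 			elif char == " ":
-- 				contador_espacios += 1
-- 				nueva_lista += " "
-- 			else:
-- 				nueva_lista += char
-- 		lista_auxiliar[i] = nueva_lista
-- 	return lista_auxiliar
-- ===== SOURCE B (Python) =====
-- def ordenar_nombres(lista):
--     resultado = []
--     for a, b, c in lista:
--         s = " ".join((b, c, a))
--         j = s.find(" ", s.find(" ") + 1)   # second space of the joined string
--         resultado.append(s[:j] + ". " + s[j+1:])
--     return resultado
-- ===== Notes on version B (the rewrite author's own statement) =====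
-- stated objective: simpler
-- what changed: Instead of A's three list passes and a per-string character walk with a space counter that rebuilds each string one character at a time, B does a single pass over the list and, per string, locates the second space of the joined string with find and splices the '. ' in with two slices (bulk slicing beats per-character string concatenation by a constant factor).
import Mathlib
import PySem

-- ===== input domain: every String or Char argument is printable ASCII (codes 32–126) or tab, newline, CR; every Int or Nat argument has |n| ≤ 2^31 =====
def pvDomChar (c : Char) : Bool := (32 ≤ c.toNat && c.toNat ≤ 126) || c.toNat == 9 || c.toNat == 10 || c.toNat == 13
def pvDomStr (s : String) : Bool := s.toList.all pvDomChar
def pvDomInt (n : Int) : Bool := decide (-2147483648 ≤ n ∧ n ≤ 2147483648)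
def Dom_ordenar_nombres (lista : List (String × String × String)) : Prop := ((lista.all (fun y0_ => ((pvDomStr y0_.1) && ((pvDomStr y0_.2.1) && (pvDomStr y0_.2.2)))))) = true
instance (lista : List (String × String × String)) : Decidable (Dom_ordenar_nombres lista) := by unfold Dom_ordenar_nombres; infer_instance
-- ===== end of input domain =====

-- B replaces A's per-string character walk (space counter, char-by-char rebuild) by locating the
-- second space with find and splicing with slices; objective: simpler. A does not mutate its argument
-- (it copies the list first), and neither does B.

-- ===== PORT A =====
-- A's innermost loop: walk the characters keeping a space counter, rebuilding the string.
def pvStep (p : Int × List Char) (ch : Char) : Int × List Char :=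
  if ch = ' ' ∧ p.1 = 1 then (p.1 + 1, p.2 ++ ['.', ' '])
  else if ch = ' ' then (p.1 + 1, p.2 ++ [' '])
  else (p.1, p.2 ++ [ch])

def pvFixA (s : String) : String :=
  String.ofList ((s.toList.foldl pvStep ((0 : Int), ([] : List Char))).2)

def ordenar_nombres (lista : List (String × String × String)) : List String :=
  -- first pass: swap each tuple to (t[1], t[2], t[0])
  let l1 := lista.map (fun x => (x.2.1, x.2.2, x.1))
  -- second pass: join with " "
  let l2 := l1.map (fun x => PySem.Str.join " " [x.1, x.2.1, x.2.2])
  -- third pass: the character loop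
  l2.map pvFixA

-- ===== PORT B =====
-- B's per-string fix: j = index of the second space (find from just past the first), then splice.
def pvFixB (s : String) : String :=
  let j := PySem.Str.findFrom s " " (PySem.Str.find s " " + 1) none
  PySem.Str.slice s none (some j) ++ ". " ++ PySem.Str.slice s (some (j + 1)) none

def ordenar_nombres_alt (lista : List (String × String × String)) : List String :=
  lista.foldl (fun res t => res ++ [pvFixB (PySem.Str.join " " [t.2.1, t.2.2, t.1])]) []

-- ===== PRECONDITION & SPEC =====
def Spec_ordenar_nombres (lista : List (String × String × String)) (out : List String) : Prop := out = ordenar_nombres_alt lista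
instance (lista : List (String × String × String)) (out : List String) : Decidable (Spec_ordenar_nombres lista out) := by unfold Spec_ordenar_nombres; infer_instance

-- ===== CLAIM (what is proved, stated in full; the proofs are below) =====
def Claim_equal_ordenar_nombres : Prop := ∀ (lista : List (String × String × String)), Dom_ordenar_nombres lista → Spec_ordenar_nombres lista (ordenar_nombres lista)

-- ===== LEMMAS AND PROOFS =====

-- ---- A-side loop phases ----
lemma pvStep_space_one (acc : List Char) : pvStep (1, acc) ' ' = (2, acc ++ ['.', ' ']) := by
  simp [pvStep]

lemma pvStep_space (c : Int) (acc : List Char) (hc : c ≠ 1) :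
    pvStep (c, acc) ' ' = (c + 1, acc ++ [' ']) := by
  simp [pvStep, hc]

lemma pvStep_char (c : Int) (acc : List Char) (ch : Char) (h : ch ≠ ' ') :
    pvStep (c, acc) ch = (c, acc ++ [ch]) := by
  simp [pvStep, h]

lemma pvFold_free (x : List Char) (hx : ' ' ∉ x) (c : Int) (acc : List Char) :
    List.foldl pvStep (c, acc) x = (c, acc ++ x) := by
  induction x generalizing acc with
  | nil => simp
  | cons a t ih =>
      have ha : a ≠ ' ' := fun h => hx (h ▸ List.mem_cons_self)
      have ht : ' ' ∉ t := fun h => hx (List.mem_cons_of_mem _ h)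
      rw [List.foldl_cons, pvStep_char c acc a ha, ih ht]
      simp

lemma pvFold_done (v : List Char) (c : Int) (hc : 2 ≤ c) (acc : List Char) :
    (List.foldl pvStep (c, acc) v).2 = acc ++ v := by
  induction v generalizing acc c with
  | nil => simp
  | cons a t ih =>
      by_cases ha : a = ' '
      · subst ha
        rw [List.foldl_cons, pvStep_space c acc (by omega), ih (c + 1) (by omega)]
        simp
      · rw [List.foldl_cons, pvStep_char c acc a ha, ih c hc]
        simp

lemma pvFixA_eq (x u v : List Char) (hx : ' ' ∉ x) (hu : ' ' ∉ u) :
    (((x ++ ' ' :: (u ++ ' ' :: v)).foldl pvStep ((0 : Int), ([] : List Char))).2)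
      = x ++ ' ' :: (u ++ '.' :: ' ' :: v) := by
  rw [List.foldl_append, pvFold_free x hx, List.foldl_cons,
    pvStep_space 0 _ (by omega), List.foldl_append, pvFold_free u hu,
    List.foldl_cons, show ((0:Int)+1) = 1 from by norm_num,
    pvStep_space_one, pvFold_done _ 2 (by omega)]
  simp

-- ---- B-side: find / findFrom / slices on a decomposed string ----
lemma pvFindGo (x y : List Char) (hx : ' ' ∉ x) (k : Nat) :
    PySem.Chars.find.go [' '] (x ++ ' ' :: y) k = ((k + x.length : Nat) : Int) := by
  induction x generalizing k with
  | nil => simp [PySem.Chars.find.go, List.isPrefixOf]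
  | cons a t ih =>
      have ha : a ≠ ' ' := fun h => hx (h ▸ List.mem_cons_self)
      have ht : ' ' ∉ t := fun h => hx (List.mem_cons_of_mem _ h)
      have hpre : List.isPrefixOf [' '] (a :: (t ++ ' ' :: y)) = false := by
        simp [List.isPrefixOf, Ne.symm ha]
      rw [List.cons_append, PySem.Chars.find.go, hpre]
      simp only [Bool.false_eq_true, if_false]
      rw [ih ht (k + 1)]
      simp; omega

lemma pvFind_first (x y : List Char) (hx : ' ' ∉ x) :
    PySem.Chars.find (x ++ ' ' :: y) [' '] = (x.length : Int) := by
  have := pvFindGo x y hx 0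
  simpa [PySem.Chars.find] using this

lemma pvFixB_eq (x u v : List Char) (hx : ' ' ∉ x) (hu : ' ' ∉ u) :
    pvFixB (String.ofList (x ++ ' ' :: (u ++ ' ' :: v)))
      = String.ofList (x ++ ' ' :: (u ++ '.' :: ' ' :: v)) := by
  unfold pvFixB
  set s : List Char := x ++ ' ' :: (u ++ ' ' :: v) with hs
  have hsub : (" " : String).toList = [' '] := rfl
  have hlist : (String.ofList s).toList = s := by simp
  have hfind : PySem.Str.find (String.ofList s) " " = (x.length : Int) := by
    simp only [PySem.Str.find, hlist, hsub]
    simpa using pvFind_first x (u ++ ' ' :: v) hx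
  have hk : x.length + 1 ≤ s.length := by simp [hs]
  have hdrop : s.drop (x.length + 1) = u ++ ' ' :: v := by
    have : s = (x ++ [' ']) ++ (u ++ ' ' :: v) := by simp [hs]
    rw [this]
    have hl : x.length + 1 = (x ++ [' ']).length := by simp
    rw [hl, List.drop_left]
  have hfind2 : PySem.Chars.find (s.drop (x.length + 1)) [' '] = (u.length : Int) := by
    rw [hdrop]; exact pvFind_first u v hu
  have hj : PySem.Str.findFrom (String.ofList s) " " (PySem.Str.find (String.ofList s) " " + 1) none
      = ((x.length + 1 + u.length : Nat) : Int) := by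
    rw [hfind]
    simp only [PySem.Str.findFrom, hlist, hsub]
    have hcast : ((x.length : Int) + 1) = ((x.length + 1 : Nat) : Int) := by push_cast; ring
    rw [hcast, PySem.Chars.findFrom_natCast s [' '] (x.length + 1) hk, hfind2]
    have hne : (u.length : Int) ≠ -1 := by omega
    rw [if_neg hne]
    push_cast; ring
  rw [hj]
  have htake : PySem.Chars.slice s none (some ((x.length + 1 + u.length : Nat) : Int))
      = x ++ ' ' :: u := by
    show PySem.List.slice s none (some ((x.length + 1 + u.length : Nat) : Int)) = x ++ ' ' :: u
    rw [PySem.List.slice_to_natCast]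
    have : s = (x ++ ' ' :: u) ++ (' ' :: v) := by simp [hs]
    rw [this]
    have hl : x.length + 1 + u.length = (x ++ ' ' :: u).length := by simp; omega
    rw [hl, List.take_left]
  have hdrop2 : PySem.Chars.slice s (some (((x.length + 1 + u.length : Nat) : Int) + 1)) none
      = v := by
    show PySem.List.slice s (some (((x.length + 1 + u.length : Nat) : Int) + 1)) none = v
    have hcast : (((x.length + 1 + u.length : Nat) : Int) + 1) = ((x.length + 1 + u.length + 1 : Nat) : Int) := by
      push_cast; ring
    rw [hcast, PySem.List.slice_from_natCast]
    have : s = (x ++ ' ' :: u ++ [' ']) ++ v := by simp [hs]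
    rw [this]
    have hl : x.length + 1 + u.length + 1 = (x ++ ' ' :: u ++ [' ']).length := by simp; omega
    rw [hl, List.drop_left]
  apply String.toList_inj.mp
  simp only [PySem.Str.slice, hlist, htake, hdrop2]
  simp

-- ---- decomposition at the first two spaces ----
lemma pvDecomp1 (s : List Char) (h : ' ' ∈ s) :
    ∃ x y, s = x ++ ' ' :: y ∧ ' ' ∉ x := by
  induction s with
  | nil => simp at h
  | cons a t ih =>
      by_cases ha : a = ' '
      · exact ⟨[], t, by simp [ha], by simp⟩
      · have ht : ' ' ∈ t := by
          rcases List.mem_cons.mp h with h' | h'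
          · exact absurd h'.symm ha
          · exact h'
        obtain ⟨x, y, hxy, hx⟩ := ih ht
        exact ⟨a :: x, y, by simp [hxy], by simp [hx, Ne.symm ha]⟩

lemma pvDecomp2 (s : List Char) (h : 2 ≤ s.count ' ') :
    ∃ x u v, s = x ++ ' ' :: (u ++ ' ' :: v) ∧ ' ' ∉ x ∧ ' ' ∉ u := by
  obtain ⟨x, y, hxy, hx⟩ := pvDecomp1 s (List.count_pos_iff.mp (by omega))
  have hcx : x.count ' ' = 0 := List.count_eq_zero.mpr hx
  rw [hxy] at h
  simp only [List.count_append, hcx, List.count_cons_self, Nat.zero_add] at h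
  have hy : ' ' ∈ y := List.count_pos_iff.mp (by omega)
  obtain ⟨u, v, huv, hu⟩ := pvDecomp1 y hy
  exact ⟨x, u, v, by rw [hxy, huv], hx, hu⟩

-- ---- per-string equality, then the joined string qualifies ----
lemma pvFix_eq (s : String) (h : 2 ≤ s.toList.count ' ') : pvFixA s = pvFixB s := by
  obtain ⟨x, u, v, hxy, hx, hu⟩ := pvDecomp2 s.toList h
  have hsrep : s = String.ofList (x ++ ' ' :: (u ++ ' ' :: v)) := by
    apply String.toList_inj.mp; simp [← hxy]
  rw [hsrep]
  unfold pvFixA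
  rw [pvFixB_eq x u v hx hu]
  congr 1
  have hl : (String.ofList (x ++ ' ' :: (u ++ ' ' :: v))).toList = x ++ ' ' :: (u ++ ' ' :: v) := by simp
  rw [hl, pvFixA_eq x u v hx hu]

lemma pvJoin_count (b c a : String) :
    2 ≤ (PySem.Str.join " " [b, c, a]).toList.count ' ' := by
  have hrep : (PySem.Str.join " " [b, c, a]).toList
      = b.toList ++ ' ' :: (c.toList ++ ' ' :: a.toList) := by
    simp [PySem.Str.join, PySem.Chars.join, List.intercalate]
  rw [hrep]
  simp only [List.count_append, List.count_cons_self]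
  omega

-- ===== VERDICT (by name: the statement is the Claim_ definition above) =====
theorem ordenar_nombres_spec : Claim_equal_ordenar_nombres := by
  intro lista _
  unfold Spec_ordenar_nombres ordenar_nombres ordenar_nombres_alt
  rw [PySem.List.foldl_append_singleton_eq_map]
  simp only [List.map_map]
  apply List.map_congr_left
  intro t _
  exact pvFix_eq _ (pvJoin_count t.2.1 t.2.2 t.1)
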